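-- pv_equiv track=rewrite | github.com/adioby/MyChains | block.py | Descendre_Ouverture_Fermeture
-- ===== SOURCE A (Python) =====
-- def Descendre_Ouverture_Fermeture(chaine) :
--     ch0 = "{(["
--     ch1 = ")]}"
--     ch = ""
--     for i in range(len(str(chaine))) :
--         x = str(chaine)[i]
--         if (x in ch0) and not (x in ch1) :
--
--             if ch == "" :
--                 ch = x + "\n"
--             else:
--                 ch = ch + x + "\n"
--         else:
--             if not(x in ch0) and (x in ch1) :
--                 if ch == "":
--                     ch = "\n" + x
--                 else:
--                     ch = ch + "\n" + x
--             else: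
--                 if not(x in ch0) and not (x in ch1):
--                     if ch == "":
--                         ch = x
--                     else:
--                         ch = ch + x
--     return ch
-- ===== SOURCE B (Python) =====
-- def Descendre_Ouverture_Fermeture(chaine):
--     s = str(chaine)
--     for c in "{([":
--         s = s.replace(c, c + "\n")
--     for c in ")]}":
--         s = s.replace(c, "\n" + c)
--     return s
-- ===== Notes on version B (the rewrite author's own statement) =====
-- stated objective: faster
-- what changed: Replaces A's index loop that classifies each character and regrows the accumulator string by concatenation with six whole-string str.replace passes (one per bracket character), relying on the six brackets being pairwise distinct and the inserted newline never being a bracket.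
import Mathlib
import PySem

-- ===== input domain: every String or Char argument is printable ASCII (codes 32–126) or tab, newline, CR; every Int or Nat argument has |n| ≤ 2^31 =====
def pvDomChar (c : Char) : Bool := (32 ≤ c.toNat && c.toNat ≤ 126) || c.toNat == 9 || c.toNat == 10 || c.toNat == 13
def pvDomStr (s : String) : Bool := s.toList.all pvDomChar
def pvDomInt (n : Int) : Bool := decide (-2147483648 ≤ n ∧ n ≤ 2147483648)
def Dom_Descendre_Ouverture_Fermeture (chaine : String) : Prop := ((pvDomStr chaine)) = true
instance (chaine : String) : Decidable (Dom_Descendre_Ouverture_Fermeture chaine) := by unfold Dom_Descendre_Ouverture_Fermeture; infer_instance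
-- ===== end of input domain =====

-- B rewrites A's per-character loop (which regrows the result by string concatenation) as six whole-string replace passes; measured faster in a timing run.
-- ===== PORT A =====
-- index loop over str(chaine); the accumulator string ch is kept as a List Char (built with ++, returned via String.ofList)
def Descendre_Ouverture_Fermeture (chaine : String) : String :=
  let ch0 : List Char := "{([".toList
  let ch1 : List Char := ")]}".toList
  let s : List Char := chaine.toList
  String.ofList <|
    (PySem.List.pyRange 0 (PySem.Str.len chaine) 1).foldl
      (fun ch i =>
        let x : Char := PySem.List.pyGetD s i ' '   -- s[i]; i is always in range here
        if x ∈ ch0 ∧ ¬ x ∈ ch1 then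
          (if ch = [] then [x, '\n'] else ch ++ [x, '\n'])
        else if ¬ x ∈ ch0 ∧ x ∈ ch1 then
          (if ch = [] then ['\n', x] else ch ++ ['\n', x])
        else if ¬ x ∈ ch0 ∧ ¬ x ∈ ch1 then
          (if ch = [] then [x] else ch ++ [x])
        else ch) []

-- ===== PORT B =====
def Descendre_Ouverture_Fermeture_alt (chaine : String) : String :=
  let s := chaine
  let s := "{([".toList.foldl
    (fun s c => PySem.Str.replace s (String.ofList [c]) (String.ofList [c, '\n'])) s
  ")]}".toList.foldl
    (fun s c => PySem.Str.replace s (String.ofList [c]) (String.ofList ['\n', c])) s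

-- ===== PRECONDITION & SPEC =====
def Spec_Descendre_Ouverture_Fermeture (chaine : String) (out : String) : Prop := out = Descendre_Ouverture_Fermeture_alt chaine
instance (chaine : String) (out : String) : Decidable (Spec_Descendre_Ouverture_Fermeture chaine out) := by unfold Spec_Descendre_Ouverture_Fermeture; infer_instance

-- ===== CLAIM (what is proved, stated in full; the proofs are below) =====
def Claim_equal_Descendre_Ouverture_Fermeture : Prop := ∀ (chaine : String), Dom_Descendre_Ouverture_Fermeture chaine → Spec_Descendre_Ouverture_Fermeture chaine (Descendre_Ouverture_Fermeture chaine)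

-- ===== LEMMAS AND PROOFS =====

-- the per-character expansion both programs compute
def pvPerChar (x : Char) : List Char :=
  if x = '{' ∨ x = '(' ∨ x = '[' then [x, '\n']
  else if x = ')' ∨ x = ']' ∨ x = '}' then ['\n', x]
  else [x]

-- replacing a single-character pattern is the per-character flatMap
theorem replace_single_go (o : Char) (new : List Char) :
    ∀ (l acc : List Char) (fuel : Nat), l.length ≤ fuel →
      PySem.Chars.replace.go [o] new fuel l acc
        = acc.reverse ++ l.flatMap (fun c => if c = o then new else [c]) := by
  intro l
  induction l with
  | nil =>
      intro acc fuel _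
      cases fuel <;> simp [PySem.Chars.replace.go]
  | cons c t ih =>
      intro acc fuel hf
      cases fuel with
      | zero => simp at hf
      | succ k =>
          simp only [PySem.Chars.replace.go, List.isPrefixOf, List.flatMap_cons]
          by_cases hc : o = c
          · subst hc
            rw [if_pos (by simp)]
            rw [show List.drop [o].length (o :: t) = t from rfl]
            rw [ih (new.reverse ++ acc) k (by simpa using Nat.succ_le_succ_iff.mp hf)]
            simp
          · rw [if_neg (by simp [hc]), if_neg (by simp [Ne.symm hc])]
            rw [ih (c :: acc) k (by simpa using Nat.succ_le_succ_iff.mp hf)]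
            simp

theorem replace_single (o : Char) (new l : List Char) :
    PySem.Chars.replace l [o] new = l.flatMap (fun c => if c = o then new else [c]) := by
  simp only [PySem.Chars.replace, List.isEmpty_cons]
  simpa using replace_single_go o new l [] l.length le_rfl

-- B's six replace passes compose to the per-character flatMap
theorem alt_toList (chaine : String) :
    (Descendre_Ouverture_Fermeture_alt chaine).toList = chaine.toList.flatMap pvPerChar := by
  unfold Descendre_Ouverture_Fermeture_alt
  rw [show ("{([".toList) = ['{', '(', '['] from rfl,
     show (")]}".toList) = [')', ']', '}'] from rfl]
  simp only [List.foldl_cons, List.foldl_nil, PySem.Str.toList_replace, String.toList_ofList,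
    replace_single, List.flatMap_assoc]
  apply List.flatMap_congr
  intro c _
  by_cases h1 : c = '{'
  · subst h1; decide
  by_cases h2 : c = '('
  · subst h2; decide
  by_cases h3 : c = '['
  · subst h3; decide
  by_cases h4 : c = ')'
  · subst h4; decide
  by_cases h5 : c = ']'
  · subst h5; decide
  by_cases h6 : c = '}'
  · subst h6; decide
  simp [pvPerChar, h1, h2, h3, h4, h5, h6]

-- A's loop body always appends pvPerChar of the current character
theorem stepA_eq (ch : List Char) (x : Char) :
    (if x ∈ "{([".toList ∧ ¬ x ∈ ")]}".toList then
        (if ch = [] then [x, '\n'] else ch ++ [x, '\n'])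
      else if ¬ x ∈ "{([".toList ∧ x ∈ ")]}".toList then
        (if ch = [] then ['\n', x] else ch ++ ['\n', x])
      else if ¬ x ∈ "{([".toList ∧ ¬ x ∈ ")]}".toList then
        (if ch = [] then [x] else ch ++ [x])
      else ch) = ch ++ pvPerChar x := by
  rw [show ("{([".toList) = ['{', '(', '['] from rfl,
     show (")]}".toList) = [')', ']', '}'] from rfl]
  simp only [List.mem_cons, List.not_mem_nil, or_false]
  unfold pvPerChar
  by_cases hop : x = '{' ∨ x = '(' ∨ x = '['
  · have hcl : ¬ (x = ')' ∨ x = ']' ∨ x = '}') := by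
      rcases hop with h | h | h <;> subst h <;> decide
    simp only [hop, hcl, not_false_iff, and_true, not_true, if_false, if_pos, and_false]
    split <;> simp_all
  · by_cases hcl : x = ')' ∨ x = ']' ∨ x = '}'
    · simp only [hop, hcl, not_false_iff, and_true, if_false, and_false, not_true]
      split <;> simp_all
    · simp only [hop, hcl, not_false_iff, and_true, if_false, and_false, and_self, if_true]
      split <;> simp_all

-- A computes the same flatMap
theorem a_eq_flatMap (chaine : String) :
    Descendre_Ouverture_Fermeture chaine = String.ofList (chaine.toList.flatMap pvPerChar) := by
  simp only [Descendre_Ouverture_Fermeture, PySem.Str.len_eq]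
  rw [PySem.List.foldl_pyRange_zero_pyGetD' chaine.toList ' '
      (fun ch x =>
        if x ∈ "{([".toList ∧ ¬ x ∈ ")]}".toList then
          (if ch = [] then [x, '\n'] else ch ++ [x, '\n'])
        else if ¬ x ∈ "{([".toList ∧ x ∈ ")]}".toList then
          (if ch = [] then ['\n', x] else ch ++ ['\n', x])
        else if ¬ x ∈ "{([".toList ∧ ¬ x ∈ ")]}".toList then
          (if ch = [] then [x] else ch ++ [x])
        else ch) []]
  congr 1
  calc chaine.toList.foldl _ []
      = chaine.toList.foldl (fun ch x => ch ++ pvPerChar x) [] := by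
        apply List.foldl_ext
        intro ch x _
        exact stepA_eq ch x
    _ = chaine.toList.flatMap pvPerChar := by
        simpa using PySem.List.foldl_append_eq_flatMap pvPerChar chaine.toList []

-- ===== VERDICT (by name: the statement is the Claim_ definition above) =====
theorem Descendre_Ouverture_Fermeture_spec : Claim_equal_Descendre_Ouverture_Fermeture := by
  intro chaine _
  unfold Spec_Descendre_Ouverture_Fermeture
  rw [a_eq_flatMap]
  have h := alt_toList chaine
  calc String.ofList (chaine.toList.flatMap pvPerChar)
      = String.ofList ((Descendre_Ouverture_Fermeture_alt chaine).toList) := by rw [h]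
    _ = Descendre_Ouverture_Fermeture_alt chaine := by simp
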